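-- pv_equiv track=rewrite | github.com/murmursh/usless_bot | solver.py | build_constraints
-- ===== SOURCE A (Python) =====
-- def build_constraints(slots):
--     """Find intersections between slots."""
--     constraints = {}
--     for i, slot1 in enumerate(slots):
--         for j, slot2 in enumerate(slots):
--             if i >= j:
--                 continue
--             for idx1, pos1 in enumerate(slot1):
--                 if pos1 in slot2:
--                     idx2 = slot2.index(pos1)
--                     constraints.setdefault(i, []).append((j, idx1, idx2))
--                     constraints.setdefault(j, []).append((i, idx2, idx1))
--     return constraints
-- ===== SOURCE B (Python) =====
-- def build_constraints(slots):
--     """Find intersections between slots (indexed: only slot pairs that share a position are visited)."""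
--     first = []  # per slot: position -> index of its first occurrence in that slot
--     for slot in slots:
--         d = {}
--         for idx, pos in enumerate(slot):
--             if pos not in d:
--                 d[pos] = idx
--         first.append(d)
--     posmap = {}  # position -> ascending list of slot indices containing it
--     for j, d in enumerate(first):
--         for pos in d:
--             posmap.setdefault(pos, []).append(j)
--     constraints = {}
--     for i, slot in enumerate(slots):
--         cand = {j for pos in slot for j in posmap.get(pos, ()) if j > i}
--         for j in sorted(cand):
--             fj = first[j]
--             for idx1, pos1 in enumerate(slot):
--                 idx2 = fj.get(pos1)
--                 if idx2 is not None:
--                     constraints.setdefault(i, []).append((j, idx1, idx2))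
--                     constraints.setdefault(j, []).append((i, idx2, idx1))
--     return constraints
-- ===== Notes on version B (the rewrite author's own statement) =====
-- stated objective: faster
-- what changed: Instead of scanning all slot pairs and running a linear membership test plus .index scan per position, B precomputes per-slot first-occurrence dicts and a position->slot-indices map, then for each slot visits only the sorted set of later slots that actually share a position, replaying A's insertion order exactly.
import Mathlib
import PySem

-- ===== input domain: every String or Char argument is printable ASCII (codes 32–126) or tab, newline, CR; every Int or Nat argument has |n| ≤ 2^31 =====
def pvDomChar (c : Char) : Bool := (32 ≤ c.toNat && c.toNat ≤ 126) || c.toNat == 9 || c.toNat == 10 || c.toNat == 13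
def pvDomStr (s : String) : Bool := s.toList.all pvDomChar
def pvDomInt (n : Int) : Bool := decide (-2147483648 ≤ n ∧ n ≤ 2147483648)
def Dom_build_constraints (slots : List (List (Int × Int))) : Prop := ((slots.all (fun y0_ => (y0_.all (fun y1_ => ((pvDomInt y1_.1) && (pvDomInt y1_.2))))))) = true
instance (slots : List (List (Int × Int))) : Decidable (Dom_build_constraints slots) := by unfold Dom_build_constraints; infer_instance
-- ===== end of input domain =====

-- B replaces A's all-pairs scan by per-slot first-index dicts and a position->slots index,
-- visiting only slot pairs that actually share a position (objective: faster).


-- ===== PORT A =====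
def build_constraints (slots : List (List (Int × Int))) : List (Int × List (Int × Int × Int)) :=
  ((PySem.List.enumerate slots).foldl (fun cs p1 =>
    (PySem.List.enumerate slots).foldl (fun cs p2 =>
      if p1.1 ≥ p2.1 then cs else
      (PySem.List.enumerate p1.2).foldl (fun cs q =>
        if p2.2.contains q.2 then
          (cs.modify p1.1 [] (· ++ [(p2.1, q.1, ((PySem.List.index? p2.2 q.2).map (fun k => (k : Int))).getD 0)])).modify
            p2.1 [] (· ++ [(p1.1, ((PySem.List.index? p2.2 q.2).map (fun k => (k : Int))).getD 0, q.1)])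
        else cs) cs) cs)
    (PySem.Dict.empty : PySem.Dict Int (List (Int × Int × Int)))).items

-- ===== PORT B =====
-- helper of Source B's first pass: dict position -> index of first occurrence in the slot
def pvFirstDict (slot : List (Int × Int)) : PySem.Dict (Int × Int) Int :=
  (PySem.List.enumerate slot).foldl
    (fun d q => if d.contains q.2 then d else d.insert q.2 q.1) PySem.Dict.empty

def build_constraints_alt (slots : List (List (Int × Int))) : List (Int × List (Int × Int × Int)) :=
  let first := slots.foldl (fun acc slot => acc ++ [pvFirstDict slot]) []
  let posmap := (PySem.List.enumerate first).foldl (fun pm p =>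
      p.2.keys.foldl (fun pm pos => pm.modify pos [] (· ++ [p.1])) pm)
    (PySem.Dict.empty : PySem.Dict (Int × Int) (List Int))
  ((PySem.List.enumerate slots).foldl (fun cs p =>
      (PySem.List.sorted (p.2.foldl (fun s pos =>
          (posmap.getD pos []).foldl (fun s j => if p.1 < j then PySem.Set.add s j else s) s)
          ([] : PySem.Set Int)) (fun j => j) false).foldl (fun cs j =>
        (PySem.List.enumerate p.2).foldl (fun cs q =>
          match (PySem.List.pyGetD first j PySem.Dict.empty).get? q.2 with
          | some idx2 =>
            (cs.modify p.1 [] (· ++ [(j, q.1, idx2)])).modify j [] (· ++ [(p.1, idx2, q.1)])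
          | none => cs) cs) cs)
    (PySem.Dict.empty : PySem.Dict Int (List (Int × Int × Int)))).items

-- ===== PRECONDITION & SPEC =====
def Spec_build_constraints (slots : List (List (Int × Int))) (out : List (Int × List (Int × Int × Int))) : Prop := out = build_constraints_alt slots
instance (slots : List (List (Int × Int))) (out : List (Int × List (Int × Int × Int))) : Decidable (Spec_build_constraints slots out) := by unfold Spec_build_constraints; infer_instance

-- ===== CLAIM (what is proved, stated in full; the proofs are below) =====
def Claim_equal_build_constraints : Prop := ∀ (slots : List (List (Int × Int))), Dom_build_constraints slots → Spec_build_constraints slots (build_constraints slots)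

-- ===== LEMMAS AND PROOFS =====

-- keys of an insert: Python's d[k] = v appends a new key, keeps an existing one in place
theorem pv_keys_insert {κ ν : Type} [BEq κ] [LawfulBEq κ] (d : PySem.Dict κ ν) (k : κ) (v : ν) :
    (d.insert k v).keys = PySem.Set.add d.keys k := by
  by_cases h : d.contains k = true
  · rw [PySem.Set.add_of_mem (by simpa [PySem.Dict.contains_iff_mem_keys] using h)]
    simp only [PySem.Dict.insert, h, if_pos, PySem.Dict.keys]
    rw [List.map_map]
    apply List.map_congr_left
    intro p hp
    by_cases hpk : (p.1 == k) = true
    · simp [Function.comp, (beq_iff_eq.mp hpk).symm]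
    · simp [Function.comp, hpk]
  · rw [PySem.Set.add_of_not_mem (by simpa [PySem.Dict.contains_iff_mem_keys] using h)]
    simp [PySem.Dict.insert, h, PySem.Dict.keys]

-- the first-pass fold of Source B, lookup in the resulting dict (generalized for the induction)
theorem pv_fd_aux_get (slot : List (Int × Int)) (s : Int) (d : PySem.Dict (Int × Int) Int)
    (pos : Int × Int) :
    ((PySem.List.enumerate slot s).foldl
      (fun d q => if d.contains q.2 then d else d.insert q.2 q.1) d).get? pos
    = (d.get? pos).or ((PySem.List.index? slot pos).map (fun k => s + (k : Int))) := by
  induction slot generalizing s d with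
  | nil => simp [PySem.List.enumerate_nil, PySem.List.index?]
  | cons p t ih =>
    rw [PySem.List.enumerate_cons, List.foldl_cons, ih]
    by_cases hpp : pos = p
    · subst hpp
      by_cases hc : d.contains pos = true
      · rw [if_pos hc]
        have hs : (d.get? pos).isSome := by rw [← PySem.Dict.contains_eq_isSome_get?]; exact hc
        rcases Option.isSome_iff_exists.mp hs with ⟨v, hv⟩
        rw [hv]
        simp [Option.or]
      · rw [if_neg hc, PySem.List.index?_cons_self]
        have hd : d.get? pos = none := by
          rw [PySem.Dict.contains_eq_isSome_get?] at hc
          cases h : d.get? pos <;> simp [h] at hc ⊢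
        rw [hd, PySem.Dict.get?_insert_self]
        simp [Option.or]
    · have hix : PySem.List.index? (p :: t) pos = (PySem.List.index? t pos).map (· + 1) :=
        PySem.List.index?_cons_of_ne _ (fun h => hpp h.symm)
      rw [hix]
      by_cases hc : d.contains p = true
      · rw [if_pos hc]
        cases hidx : PySem.List.index? t pos <;> cases hd : d.get? pos <;>
          simp [Option.or] <;> ring
      · rw [if_neg hc]
        rw [PySem.Dict.get?_insert_of_ne _ _ hpp]
        cases hidx : PySem.List.index? t pos <;> cases hd : d.get? pos <;>
          simp [Option.or] <;> ring

theorem pv_fd_get (slot : List (Int × Int)) (pos : Int × Int) :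
    (pvFirstDict slot).get? pos = (PySem.List.index? slot pos).map (fun k => (k : Int)) := by
  rw [pvFirstDict, pv_fd_aux_get]
  cases h : PySem.List.index? slot pos <;> simp [Option.or, PySem.Dict.get?_empty]

theorem pv_fd_aux_keys (slot : List (Int × Int)) (s : Int) (d : PySem.Dict (Int × Int) Int) :
    ((PySem.List.enumerate slot s).foldl
      (fun d q => if d.contains q.2 then d else d.insert q.2 q.1) d).keys
    = PySem.Set.update d.keys slot := by
  induction slot generalizing s d with
  | nil => simp [PySem.List.enumerate_nil, PySem.Set.update]
  | cons p t ih =>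
    rw [PySem.List.enumerate_cons, List.foldl_cons, PySem.Set.update_cons]
    by_cases hc : d.contains p = true
    · rw [if_pos hc, ih,
        PySem.Set.add_of_mem (by simpa [PySem.Dict.contains_iff_mem_keys] using hc)]
    · rw [if_neg hc, ih, pv_keys_insert]

theorem pv_fd_keys (slot : List (Int × Int)) :
    (pvFirstDict slot).keys = PySem.List.dedup slot := by
  rw [pvFirstDict, pv_fd_aux_keys]
  simp [PySem.Set.update_nil_left]

-- second pass of Source B (the position -> slot indices map), named for the proofs
def pvPosmap (slots : List (List (Int × Int))) : PySem.Dict (Int × Int) (List Int) :=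
  (PySem.List.enumerate (slots.map pvFirstDict)).foldl (fun pm p =>
      p.2.keys.foldl (fun pm pos => pm.modify pos [] (· ++ [p.1])) pm)
    PySem.Dict.empty

theorem pv_filter_beq_nodup {α : Type} [BEq α] [LawfulBEq α] (l : List α) (v : α)
    (h : l.Nodup) : l.filter (fun x => x == v) = if v ∈ l then [v] else [] := by
  induction l with
  | nil => simp
  | cons x t ih =>
    rcases List.nodup_cons.mp h with ⟨hx, ht⟩
    by_cases hxv : x = v
    · subst hxv
      simp [ih ht, hx]
    · simp [hxv, ih ht, Ne.symm hxv]

theorem pv_posmap_core (xs : List (List (Int × Int))) (s : Int) (pos : Int × Int) :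
    (PySem.List.enumerate (xs.map pvFirstDict) s).flatMap
      (fun p => if pos ∈ p.2.keys then [p.1] else [])
    = ((List.range xs.length).filter (fun k => decide (pos ∈ xs.getD k []))).map
        (fun (k : Nat) => s + (k : Int)) := by
  induction xs generalizing s with
  | nil => simp [PySem.List.enumerate_nil]
  | cons y ys ih =>
    rw [List.map_cons, PySem.List.enumerate_cons, List.flatMap_cons, ih,
      List.length_cons, List.range_succ_eq_map, List.filter_cons, List.filter_map]
    have hhead : (pos ∈ (pvFirstDict y).keys) ↔ pos ∈ y := by
      rw [pv_fd_keys]; exact PySem.List.mem_dedup y pos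
    have hcond : (fun k => decide (pos ∈ (y :: ys).getD k [])) ∘ Nat.succ
        = fun k => decide (pos ∈ ys.getD k []) := by
      funext k; simp [Function.comp]
    have hmap : ((fun (k : Nat) => s + (k : Int)) ∘ Nat.succ)
        = fun (k : Nat) => (s + 1) + (k : Int) := by
      funext k; simp [Function.comp]; ring
    by_cases hp : pos ∈ y
    · have h0 : pos ∈ (pvFirstDict y).keys := hhead.mpr hp
      simp only [hp, h0, List.getD_cons_zero, decide_true, if_pos, List.map_cons,
        List.map_map, hcond, hmap]
      simp
    · have h0 : ¬ pos ∈ (pvFirstDict y).keys := fun h => hp (hhead.mp h)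
      simp only [hp, h0, List.getD_cons_zero, decide_false, if_false, List.map_map, hcond]
      simp
      intro a _ _
      ring

theorem pv_posmap_getD (slots : List (List (Int × Int))) (pos : Int × Int) :
    (pvPosmap slots).getD pos []
    = ((List.range slots.length).filter (fun k => decide (pos ∈ slots.getD k []))).map
        (fun (k : Nat) => (k : Int)) := by
  rw [pvPosmap]
  have h1 : ∀ (p : Int × PySem.Dict (Int × Int) Int)
      (pm : PySem.Dict (Int × Int) (List Int)),
      p.2.keys.foldl (fun pm pos => pm.modify pos [] (· ++ [p.1])) pm
      = (p.2.keys.map (fun pos => (pos, p.1))).foldl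
          (fun pm pr => pm.modify pr.1 [] (· ++ [pr.2])) pm := by
    intro p pm; rw [List.foldl_map]
  have h2 : (PySem.List.enumerate (slots.map pvFirstDict)).foldl (fun pm p =>
        p.2.keys.foldl (fun pm pos => pm.modify pos [] (· ++ [p.1])) pm)
        (PySem.Dict.empty : PySem.Dict (Int × Int) (List Int))
      = ((PySem.List.enumerate (slots.map pvFirstDict)).flatMap
          (fun p => p.2.keys.map (fun pos => (pos, p.1)))).foldl
          (fun pm pr => pm.modify pr.1 [] (· ++ [pr.2])) PySem.Dict.empty := by
    rw [List.foldl_flatMap]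
    apply PySem.List.foldl_congr_mem (h := fun pm p _ => h1 p pm)
  rw [h2, PySem.Dict.getD_foldl_modify_append, PySem.Dict.getD_empty, List.nil_append,
    List.filter_flatMap, List.map_flatMap]
  have h3 : ∀ (p : Int × PySem.Dict (Int × Int) Int),
      p ∈ PySem.List.enumerate (slots.map pvFirstDict) →
      ((p.2.keys.map (fun pos' => (pos', p.1))).filter (fun pr => pr.1 == pos)).map (·.2)
      = if pos ∈ p.2.keys then [p.1] else [] := by
    intro p hp
    rw [List.filter_map]
    have hk : p.2.keys.Nodup := by
      rcases (PySem.List.mem_enumerate_iff _ _ _).mp hp with ⟨k, hk, rfl⟩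
      simp only [List.getElem_map]
      rw [pv_fd_keys]
      exact PySem.List.nodup_dedup _
    have : (fun pr => pr.1 == pos) ∘ (fun pos' => ((pos', p.1) : (Int × Int) × Int))
        = fun pos' => pos' == pos := by funext x; simp [Function.comp]
    rw [this, pv_filter_beq_nodup _ _ hk]
    by_cases hmem : pos ∈ p.2.keys <;> simp [hmem]
  rw [List.flatMap_congr h3]
  rw [pv_posmap_core slots 0 pos]
  simp

-- a fold that ignores elements failing q folds only over the q-filter
theorem pv_foldl_filter_of_id {α β : Type} (l : List α) (f : β → α → β) (q : α → Bool)
    (i : β) (h : ∀ acc, ∀ x ∈ l, q x = false → f acc x = acc) :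
    l.foldl f i = (l.filter q).foldl f i := by
  induction l generalizing i with
  | nil => simp
  | cons x t ih =>
    by_cases hx : q x = true
    · simp only [List.foldl_cons, List.filter_cons, hx, if_pos]
      exact ih _ (fun acc y hy hqy => h acc y (List.mem_cons_of_mem _ hy) hqy)
    · simp only [List.foldl_cons, List.filter_cons, hx]
      rw [h i x (List.mem_cons_self) (by simpa using hx)]
      simp only [Bool.false_eq_true, ite_false]
      exact ih _ (fun acc y hy hqy => h acc y (List.mem_cons_of_mem _ hy) hqy)

-- the candidate set of Source B, named for the proofs
def pvCand (slots : List (List (Int × Int))) (i : Int) (slot1 : List (Int × Int)) : PySem.Set Int :=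
  slot1.foldl (fun s pos =>
    ((pvPosmap slots).getD pos []).foldl (fun s j => if i < j then PySem.Set.add s j else s) s) []

theorem pv_foldl_update {α β : Type} [BEq α] [LawfulBEq α] (l : List β) (g : β → List α)
    (s : PySem.Set α) :
    l.foldl (fun s x => PySem.Set.update s (g x)) s = PySem.Set.update s (l.flatMap g) := by
  induction l generalizing s with
  | nil => simp [PySem.Set.update]
  | cons x t ih => rw [List.foldl_cons, ih, List.flatMap_cons, PySem.Set.update_append]

theorem pv_cand_eq (slots : List (List (Int × Int))) (i : Int) (slot1 : List (Int × Int)) :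
    pvCand slots i slot1
    = PySem.Set.ofList (slot1.flatMap
        (fun pos => ((pvPosmap slots).getD pos []).filter (fun j => decide (i < j)))) := by
  rw [pvCand]
  have h1 : ∀ (s : PySem.Set Int) (pos : Int × Int),
      ((pvPosmap slots).getD pos []).foldl (fun s j => if i < j then PySem.Set.add s j else s) s
      = PySem.Set.update s (((pvPosmap slots).getD pos []).filter (fun j => decide (i < j))) := by
    intro s pos
    rw [PySem.List.foldl_ite_eq_foldl_filter]
    rfl
  calc slot1.foldl (fun s pos =>
        ((pvPosmap slots).getD pos []).foldl (fun s j => if i < j then PySem.Set.add s j else s) s) []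
      = slot1.foldl (fun s pos =>
        PySem.Set.update s (((pvPosmap slots).getD pos []).filter (fun j => decide (i < j)))) [] := by
        apply PySem.List.foldl_congr_mem (h := fun s pos _ => h1 s pos)
    _ = _ := by
        rw [pv_foldl_update]
        exact (PySem.Set.update_nil_left _).symm

theorem pv_nodup_cand (slots : List (List (Int × Int))) (i : Int) (slot1 : List (Int × Int)) :
    (pvCand slots i slot1).Nodup := by
  rw [pv_cand_eq]; exact PySem.Set.nodup_ofList _

theorem pv_mem_cand (slots : List (List (Int × Int))) (i : Int) (slot1 : List (Int × Int))
    (j : Int) :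
    j ∈ pvCand slots i slot1
    ↔ ∃ pos ∈ slot1, j ∈ (pvPosmap slots).getD pos [] ∧ i < j := by
  rw [pv_cand_eq, PySem.Set.mem_ofList]
  simp only [List.mem_flatMap, List.mem_filter, decide_eq_true_eq]

-- Source B's sorted(cand): the ascending list of partner indices that share a position with slot1
def pvYs (slots : List (List (Int × Int))) (i : Int) (slot1 : List (Int × Int)) : List Int :=
  ((List.range slots.length).filter
    (fun (k : Nat) => decide (i < (k : Int)) && slot1.any (fun pos => decide (pos ∈ slots.getD k [])))).map
    (fun (k : Nat) => (k : Int))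

theorem pv_sorted_cand (slots : List (List (Int × Int))) (i : Int) (slot1 : List (Int × Int)) :
    PySem.List.sorted (pvCand slots i slot1) (fun j => j) false = pvYs slots i slot1 := by
  apply PySem.List.sorted_eq_of_perm_of_pairwise_lt
  · rw [List.perm_ext_iff_of_nodup]
    · intro j
      rw [pv_mem_cand]
      simp only [pvYs, List.mem_map, List.mem_filter, List.mem_range, Bool.and_eq_true,
        decide_eq_true_eq, List.any_eq_true]
      constructor
      · rintro ⟨k, ⟨hk, hik, pos, hpos, hmem⟩, rfl⟩
        refine ⟨pos, hpos, ?_, hik⟩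
        rw [pv_posmap_getD]
        simp only [List.mem_map, List.mem_filter, List.mem_range, decide_eq_true_eq]
        exact ⟨k, ⟨hk, hmem⟩, rfl⟩
      · rintro ⟨pos, hpos, hj, hij⟩
        rw [pv_posmap_getD] at hj
        simp only [List.mem_map, List.mem_filter, List.mem_range, decide_eq_true_eq] at hj
        rcases hj with ⟨k, ⟨hk, hmem⟩, rfl⟩
        exact ⟨k, ⟨hk, hij, pos, hpos, hmem⟩, rfl⟩
    · apply List.Nodup.map
      · intro a b hab
        exact_mod_cast (show (a : Int) = b by simpa using hab)
      · exact (List.nodup_range).filter _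
    · exact pv_nodup_cand slots i slot1
  · rw [pvYs]
    apply List.Pairwise.map
    · intro a b hab
      exact_mod_cast hab
    · exact (List.pairwise_lt_range).filter _

-- A's inner loop over slot1 against a fixed partner slot
def pvInnerA (i : Int) (slot1 slot2 : List (Int × Int)) (j : Int)
    (cs : PySem.Dict Int (List (Int × Int × Int))) : PySem.Dict Int (List (Int × Int × Int)) :=
  (PySem.List.enumerate slot1).foldl (fun cs q =>
    if slot2.contains q.2 then
      (cs.modify i [] (· ++ [(j, q.1, ((PySem.List.index? slot2 q.2).map (fun k => (k : Int))).getD 0)])).modify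
        j [] (· ++ [(i, ((PySem.List.index? slot2 q.2).map (fun k => (k : Int))).getD 0, q.1)])
    else cs) cs

-- B's inner loop over slot1 against partner index j
def pvInnerB (slots : List (List (Int × Int))) (i : Int) (slot1 : List (Int × Int)) (j : Int)
    (cs : PySem.Dict Int (List (Int × Int × Int))) : PySem.Dict Int (List (Int × Int × Int)) :=
  (PySem.List.enumerate slot1).foldl (fun cs q =>
    match (PySem.List.pyGetD (slots.map pvFirstDict) j PySem.Dict.empty).get? q.2 with
    | some idx2 =>
      (cs.modify i [] (· ++ [(j, q.1, idx2)])).modify j [] (· ++ [(i, idx2, q.1)])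
    | none => cs) cs

theorem pv_innerA_id (i : Int) (slot1 slot2 : List (Int × Int)) (j : Int)
    (cs : PySem.Dict Int (List (Int × Int × Int)))
    (h : ∀ pos ∈ slot1, pos ∉ slot2) : pvInnerA i slot1 slot2 j cs = cs := by
  rw [pvInnerA]
  calc _ = (PySem.List.enumerate slot1).foldl (fun cs _ => cs) cs := by
        apply PySem.List.foldl_congr_mem
        intro cs q hq
        have : q.2 ∈ slot1 := by
          rcases (PySem.List.mem_enumerate_iff _ _ _).mp hq with ⟨k, hk, rfl⟩
          exact List.getElem_mem _
        rw [if_neg]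
        simp only [List.contains_iff_mem]
        exact fun hm => h _ this (by exact_mod_cast hm)
    _ = cs := PySem.List.foldl_ignore _ _

theorem pv_innerAB (slots : List (List (Int × Int))) (i : Int) (slot1 : List (Int × Int))
    (k : Nat) (hk : k < slots.length)
    (cs : PySem.Dict Int (List (Int × Int × Int))) :
    pvInnerA i slot1 (slots.getD k []) (k : Int) cs = pvInnerB slots i slot1 (k : Int) cs := by
  rw [pvInnerA, pvInnerB]
  apply PySem.List.foldl_congr_mem
  intro cs q _
  have hfj : PySem.List.pyGetD (slots.map pvFirstDict) (k : Int) PySem.Dict.empty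
      = pvFirstDict (slots.getD k []) := by
    rw [PySem.List.pyGetD_natCast]
    rw [List.getD_eq_getElem?_getD, List.getD_eq_getElem?_getD, List.getElem?_map]
    rw [List.getElem?_eq_getElem hk]
    rfl
  rw [hfj, pv_fd_get]
  cases hidx : PySem.List.index? (slots.getD k []) q.2 with
  | none =>
    have hnc : ¬ ((slots.getD k []).contains q.2 = true) := by
      simp only [List.contains_iff_mem]
      exact fun hm => (PySem.List.index?_eq_none_iff _ _).mp hidx hm
    rw [if_neg hnc]
    rfl
  | some k2 =>
    have hc : (slots.getD k []).contains q.2 = true := by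
      simp only [List.contains_iff_mem]
      have hs : (PySem.List.index? (slots.getD k []) q.2).isSome := by rw [hidx]; rfl
      exact (PySem.List.index?_isSome_iff _ _).mp hs
    rw [if_pos hc]
    rfl

-- one outer iteration of A equals one outer iteration of B
theorem pv_perI (slots : List (List (Int × Int))) (i : Int) (slot1 : List (Int × Int))
    (cs : PySem.Dict Int (List (Int × Int × Int))) :
    (PySem.List.enumerate slots).foldl
      (fun cs p2 => if i ≥ p2.1 then cs else pvInnerA i slot1 p2.2 p2.1 cs) cs
    = (pvYs slots i slot1).foldl (fun cs j => pvInnerB slots i slot1 j cs) cs := by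
  rw [PySem.List.enumerate_eq_map_pyRange slots [], List.foldl_map, PySem.List.len_eq,
    PySem.List.pyRange_zero_nat, List.foldl_map]
  have step1 : ∀ (cs : PySem.Dict Int (List (Int × Int × Int))) (k : Nat),
      k ∈ List.range slots.length →
      (if i ≥ ((k : Int), PySem.List.pyGetD slots (k : Int) []).1 then cs
       else pvInnerA i slot1 ((k : Int), PySem.List.pyGetD slots (k : Int) []).2
         ((k : Int), PySem.List.pyGetD slots (k : Int) []).1 cs)
      = (if i < (k : Int) then pvInnerA i slot1 (slots.getD k []) (k : Int) cs else cs) := by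
    intro cs k _
    rw [PySem.List.pyGetD_natCast]
    by_cases h : i < (k : Int)
    · rw [if_pos h, if_neg (by omega)]
    · rw [if_neg h, if_pos (by omega)]
  rw [PySem.List.foldl_congr_mem (h := step1)]
  rw [PySem.List.foldl_ite_eq_foldl_filter (p := fun k : Nat => i < (k : Int))
    (f := fun cs k => pvInnerA i slot1 (slots.getD k []) (k : Int) cs)]
  rw [pv_foldl_filter_of_id _ _ (fun k => slot1.any (fun pos => decide (pos ∈ slots.getD k []))) _
    (by
      intro acc k hkmem hq
      apply pv_innerA_id
      intro pos hpos hmem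
      have : slot1.any (fun pos => decide (pos ∈ slots.getD k [])) = true :=
        List.any_eq_true.mpr ⟨pos, hpos, by simpa using hmem⟩
      simp only at hq
      rw [hq] at this
      exact Bool.false_ne_true this)]
  rw [List.filter_filter, pvYs, List.foldl_map]
  have hfc : ∀ k : Nat,
      (slot1.any (fun pos => decide (pos ∈ slots.getD k [])) && decide (i < (k : Int)))
      = (decide (i < (k : Int)) && slot1.any (fun pos => decide (pos ∈ slots.getD k []))) := by
    intro k; exact Bool.and_comm _ _
  rw [List.filter_congr (fun k _ => hfc k)]
  apply PySem.List.foldl_congr_mem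
  intro cs k hkmem
  have hk : k < slots.length := by
    have := List.mem_filter.mp hkmem
    exact List.mem_range.mp this.1
  exact pv_innerAB slots i slot1 k hk cs

-- Source B's main loop, written with the named pieces
theorem pv_alt_eq (slots : List (List (Int × Int))) :
    build_constraints_alt slots
    = ((PySem.List.enumerate slots).foldl (fun cs p =>
        (PySem.List.sorted (pvCand slots p.1 p.2) (fun j => j) false).foldl
          (fun cs j => pvInnerB slots p.1 p.2 j cs) cs)
      (PySem.Dict.empty : PySem.Dict Int (List (Int × Int × Int)))).items := by
  rw [build_constraints_alt]
  have hfirst : slots.foldl (fun acc slot => acc ++ [pvFirstDict slot]) []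
      = slots.map pvFirstDict := by
    rw [PySem.List.foldl_append_singleton_eq_map]
    simp
  simp only [hfirst]
  rfl

-- ===== VERDICT (by name: the statement is the Claim_ definition above) =====
theorem build_constraints_spec : Claim_equal_build_constraints := by
  intro slots _
  unfold Spec_build_constraints
  rw [build_constraints, pv_alt_eq]
  congr 1
  apply PySem.List.foldl_congr_mem
  intro cs p _
  rw [pv_sorted_cand]
  exact pv_perI slots p.1 p.2 cs
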